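-- pv_equiv track=rewrite | github.com/rixon/aoc2023 | 3/3a.py | parse_line
-- ===== SOURCE A (Python) =====
-- def parse_line(thisline):
--   in_number = False
--   # pnums (Part Numbers) will be a list of tuples (part_num, start_posn)
--   pnums=[]
--   # parts are just a single char so will just be a list of positions.
--   parts=[]
--   new_num=""
--
--   for i, c in enumerate(thisline):
--     if c.isdigit():
--       if not in_number:
--         in_number = True
--         start_pos = i
--       new_num+=c
--     elif c == ".":
--       # null value; noop.
--       if in_number:
--         # End the part number; save it.
--         in_number=False
--         pnums.append((new_num, start_pos))
--         new_num=""
--     else: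
--       # implied symbol - this is a part.
--       parts.append(i)
--       if in_number:
--         # End the part number; save it.
--         in_number=False
--         pnums.append((new_num, start_pos))
--         new_num=""
--
--   # Save the last number (if it's the end of line)
--   if in_number:
--     pnums.append((new_num, start_pos))
--   return(pnums, parts)
-- ===== SOURCE B (Python) =====
-- def parse_line(thisline):
--     pnums = []
--     parts = []
--     n = len(thisline)
--     i = 0
--     while i < n:
--         if thisline[i].isdigit():
--             j = i + 1
--             while j < n and thisline[j].isdigit():
--                 j += 1
--             pnums.append((thisline[i:j], i))
--             i = j
--         else:
--             if thisline[i] != ".":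
--                 parts.append(i)
--             i += 1
--     return (pnums, parts)
-- ===== Notes on version B (the rewrite author's own statement) =====
-- stated objective: simpler
-- what changed: replaces the flag-based character state machine (in_number/new_num/start_pos with duplicated number-termination code) by an index-jumping scan that consumes each digit run in one inner step and slices the number out directly
import Mathlib
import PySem

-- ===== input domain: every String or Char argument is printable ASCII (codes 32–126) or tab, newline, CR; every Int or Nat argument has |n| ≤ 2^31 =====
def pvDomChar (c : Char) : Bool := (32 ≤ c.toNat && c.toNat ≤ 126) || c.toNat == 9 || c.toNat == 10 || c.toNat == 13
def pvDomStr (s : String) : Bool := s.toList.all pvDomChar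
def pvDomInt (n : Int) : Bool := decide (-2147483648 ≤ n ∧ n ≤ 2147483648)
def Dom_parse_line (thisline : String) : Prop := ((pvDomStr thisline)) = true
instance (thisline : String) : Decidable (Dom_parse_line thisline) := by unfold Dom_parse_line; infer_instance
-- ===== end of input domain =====

-- B replaces A's flag-based state machine by an index-jumping run scan; objective: simpler (same O(n) cost).

-- ===== PORT A =====
-- A's for-loop over enumerate(thisline), state (in_number, start_pos, pnums, parts, new_num);
-- Char.isDigit matches Python's c.isdigit() exactly on the ASCII domain Dom_parse_line.
def parseGoA : List Char → Int → Bool → Int → List (String × Int) → List Int → List Char →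
    (List (String × Int)) × List Int
  | [], _, inN, sp, pnums, parts, newNum =>
      -- after the loop: save the last number if in_number
      if inN then (pnums ++ [(String.ofList newNum, sp)], parts) else (pnums, parts)
  | c :: rest, i, inN, sp, pnums, parts, newNum =>
      if c.isDigit then
        parseGoA rest (i + 1) true (if !inN then i else sp) pnums parts (newNum ++ [c])
      else if c = '.' then
        if inN then
          parseGoA rest (i + 1) false sp (pnums ++ [(String.ofList newNum, sp)]) parts []
        else
          parseGoA rest (i + 1) inN sp pnums parts newNum
      else
        if inN then
          parseGoA rest (i + 1) false sp (pnums ++ [(String.ofList newNum, sp)]) (parts ++ [i]) []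
        else
          parseGoA rest (i + 1) inN sp pnums (parts ++ [i]) newNum

def parse_line (thisline : String) : (List (String × Int)) × List Int :=
  parseGoA thisline.toList 0 false 0 [] [] []

-- ===== PORT B =====
-- B's outer while loop; the inner `while j < n and thisline[j].isdigit()` scan together with the
-- slice thisline[i:j] is the takeWhile/dropWhile split of the digit run.
def parseGoB : List Char → Int → List (String × Int) → List Int → (List (String × Int)) × List Int
  | [], _, pnums, parts => (pnums, parts)
  | c :: rest, i, pnums, parts =>
      if c.isDigit then
        parseGoB (rest.dropWhile Char.isDigit)
          (i + 1 + (rest.takeWhile Char.isDigit).length)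
          (pnums ++ [(String.ofList (c :: rest.takeWhile Char.isDigit), i)]) parts
      else if c = '.' then
        parseGoB rest (i + 1) pnums parts
      else
        parseGoB rest (i + 1) pnums (parts ++ [i])
  termination_by l => l.length
  decreasing_by
  · simpa using Nat.lt_succ_of_le (List.length_dropWhile_le _ _)
  · simp
  · simp

def parse_line_alt (thisline : String) : (List (String × Int)) × List Int :=
  parseGoB thisline.toList 0 [] []

-- ===== PRECONDITION & SPEC =====
def Spec_parse_line (thisline : String) (out : (List (String × Int)) × List Int) : Prop := out = parse_line_alt thisline
instance (thisline : String) (out : (List (String × Int)) × List Int) : Decidable (Spec_parse_line thisline out) := by unfold Spec_parse_line; infer_instance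

-- ===== CLAIM (what is proved, stated in full; the proofs are below) =====
def Claim_equal_parse_line : Prop := ∀ (thisline : String), Dom_parse_line thisline → Spec_parse_line thisline (parse_line thisline)

-- ===== LEMMAS AND PROOFS =====

-- continuation of A after a digit run ends: d is the remainder, i the index of its head
def parseEnd (d : List Char) (i sp : Int) (pnums : List (String × Int)) (parts : List Int) :
    (List (String × Int)) × List Int :=
  match d with
  | [] => (pnums, parts)
  | c :: rest => parseGoA rest (i + 1) false sp pnums (if c = '.' then parts else parts ++ [i]) []

-- While A is inside a number, it accumulates the whole digit run, then closes the number.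
theorem parseGoA_true (l : List Char) : ∀ (i sp : Int) pnums parts acc,
    parseGoA l i true sp pnums parts acc =
      parseEnd (l.dropWhile Char.isDigit) (i + (l.takeWhile Char.isDigit).length) sp
        (pnums ++ [(String.ofList (acc ++ l.takeWhile Char.isDigit), sp)]) parts := by
  induction l with
  | nil => intro i sp pnums parts acc; simp [parseGoA, parseEnd]
  | cons c rest ih =>
    intro i sp pnums parts acc
    by_cases hd : c.isDigit
    · rw [parseGoA, if_pos hd, ih]
      simp only [List.takeWhile_cons, List.dropWhile_cons, hd, if_true]
      have harith : i + 1 + ((rest.takeWhile Char.isDigit).length : Int)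
          = i + (((c :: rest.takeWhile Char.isDigit).length : Int)) := by
        simp; ring
      rw [harith]; simp
    · rw [parseGoA, if_neg hd]
      simp only [List.takeWhile_cons, List.dropWhile_cons, hd]
      by_cases hdot : c = '.' <;> simp [hdot, parseEnd]

theorem takeWhile_dropWhile_length {p : Char → Bool} (l : List Char) :
    (l.takeWhile p).length + (l.dropWhile p).length = l.length := by
  rw [← List.length_append, List.takeWhile_append_dropWhile]

-- Main: from the not-in-number state, A's state machine computes B's run scan.
theorem goA_eq_goB : ∀ n (l : List Char), l.length ≤ n → ∀ (i sp : Int) pnums parts,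
    parseGoA l i false sp pnums parts [] = parseGoB l i pnums parts := by
  intro n
  induction n with
  | zero =>
    intro l hl i sp pnums parts
    have : l = [] := List.eq_nil_of_length_eq_zero (Nat.le_zero.mp hl)
    subst this; simp [parseGoA, parseGoB]
  | succ n ih =>
    intro l hl i sp pnums parts
    cases l with
    | nil => simp [parseGoA, parseGoB]
    | cons c rest =>
      have hrl : rest.length ≤ n := Nat.lt_succ_iff.mp (by simpa using hl)
      by_cases hd : c.isDigit
      · rw [parseGoA, if_pos hd, parseGoA_true, parseGoB, if_pos hd]
        cases hdw : rest.dropWhile Char.isDigit with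
        | nil => simp [parseEnd, parseGoB]
        | cons c' rest' =>
          have hc' : c'.isDigit = false := by
            have := List.head?_dropWhile_not Char.isDigit rest
            rw [hdw] at this; simpa using this
          have hlen := takeWhile_dropWhile_length (p := Char.isDigit) rest
          rw [hdw] at hlen
          have hr' : rest'.length ≤ n := by simp at hlen hrl ⊢; omega
          by_cases hdot : c' = '.' <;> simp [hdot, parseEnd, parseGoB, hc', ih rest' hr']
      · rw [parseGoA, if_neg hd, parseGoB, if_neg hd]
        by_cases hdot : c = '.' <;> simp [hdot, ih rest hrl]

-- ===== VERDICT (by name: the statement is the Claim_ definition above) =====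
theorem parse_line_spec : Claim_equal_parse_line := by
  intro s _
  show parse_line s = parse_line_alt s
  exact goA_eq_goB s.toList.length s.toList le_rfl 0 0 [] []
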